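-- pv_equiv track=rewrite | github.com/DeboraKlein/Pytab | validation/validate_suite.py | _status_rollup
-- ===== SOURCE A (Python) =====
-- from typing import Any, Dict
--
-- def _status_rollup(checks: Dict[str, Any]) -> str:
--     statuses = [v.get("status") for v in checks.values() if isinstance(v, dict)]
--     if not statuses:
--         return "SKIPPED"
--     if any(s == "FAIL" for s in statuses):
--         return "FAIL"
--     if any(s == "ERROR" for s in statuses):
--         return "ERROR"
--     return "PASS"
-- ===== SOURCE B (Python) =====
-- def _status_rollup(checks):
--     # Severity lattice: rollup = the maximum severity seen, looked up in a table.
--     rank = max(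
--         (3 if v.get("status") == "FAIL" else 2 if v.get("status") == "ERROR" else 1
--          for v in checks.values() if isinstance(v, dict)),
--         default=0,
--     )
--     return ["SKIPPED", "PASS", "ERROR", "FAIL"][rank]
-- ===== Notes on version B (the rewrite author's own statement) =====
-- stated objective: alternative
-- what changed: Replaced A's statuses list plus priority early-return chain of any() scans with a severity-lattice formulation: each dict is mapped to a numeric severity, the maximum is taken, and the result is a table lookup.
import Mathlib
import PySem

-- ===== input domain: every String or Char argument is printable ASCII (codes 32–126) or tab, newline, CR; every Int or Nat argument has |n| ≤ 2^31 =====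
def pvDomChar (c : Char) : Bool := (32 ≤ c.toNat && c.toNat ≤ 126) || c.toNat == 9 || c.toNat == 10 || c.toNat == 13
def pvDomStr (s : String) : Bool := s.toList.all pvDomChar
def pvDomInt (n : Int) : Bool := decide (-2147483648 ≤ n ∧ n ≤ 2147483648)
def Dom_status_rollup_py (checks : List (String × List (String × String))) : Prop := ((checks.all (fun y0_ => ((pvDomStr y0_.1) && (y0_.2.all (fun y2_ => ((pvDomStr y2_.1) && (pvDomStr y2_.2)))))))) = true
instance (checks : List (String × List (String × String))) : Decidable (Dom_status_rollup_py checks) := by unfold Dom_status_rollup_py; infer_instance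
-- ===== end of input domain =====

-- B recasts A's priority chain of any() scans as a severity lattice: map each dict to a numeric severity, take the max, and index a table (objective: alternative).


-- ===== PORT A =====
-- Under the type convention every value in `checks` is a dict (List (String × String)),
-- so `isinstance(v, dict)` is always true and the comprehension keeps every value.
def status_rollup_py (checks : List (String × List (String × String))) : String :=
  let statuses : List (Option String) := checks.map (fun kv => (PySem.Dict.mk kv.2).get? "status")
  if statuses.isEmpty then "SKIPPED"
  else if statuses.any (fun s => s == some "FAIL") then "FAIL"
  else if statuses.any (fun s => s == some "ERROR") then "ERROR"
  else "PASS"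

-- ===== PORT B =====
-- severity of one value, as in Source B's conditional expression
def pvSeverity (s : Option String) : Nat :=
  if s == some "FAIL" then 3 else if s == some "ERROR" then 2 else 1

-- max of the severity generator (default 0), then table lookup.
-- The rank is always ≤ 3, so the `.getD ""` arm of the table lookup is unreachable.
def status_rollup_py_alt (checks : List (String × List (String × String))) : String :=
  let rank : Nat :=
    (checks.map (fun kv => pvSeverity ((PySem.Dict.mk kv.2).get? "status"))).foldl Nat.max 0
  (PySem.List.pyGet? ["SKIPPED", "PASS", "ERROR", "FAIL"] (rank : Int)).getD ""

-- ===== PRECONDITION & SPEC =====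
def Spec_status_rollup_py (checks : List (String × List (String × String))) (out : String) : Prop := out = status_rollup_py_alt checks
instance (checks : List (String × List (String × String))) (out : String) : Decidable (Spec_status_rollup_py checks out) := by unfold Spec_status_rollup_py; infer_instance

-- ===== CLAIM (what is proved, stated in full; the proofs are below) =====
def Claim_equal_status_rollup_py : Prop := ∀ (checks : List (String × List (String × String))), Dom_status_rollup_py checks → Spec_status_rollup_py checks (status_rollup_py checks)

-- ===== LEMMAS AND PROOFS =====

-- characterisation of B's max-fold over severities (generalized over the accumulator)
theorem pv_fold_max_char (l : List (Option String)) (a : Nat) :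
    (l.map pvSeverity).foldl Nat.max a
    = a.max (if l.any (fun s => s == some "FAIL") then 3
       else if l.any (fun s => s == some "ERROR") then 2
       else if l.isEmpty then 0 else 1) := by
  induction l generalizing a with
  | nil => simp
  | cons h t ih =>
    simp only [List.map_cons, List.foldl_cons, List.any_cons, List.isEmpty_cons]
    rw [ih]
    unfold pvSeverity
    split_ifs <;> simp_all

-- A's priority chain equals the table lookup at the max severity
theorem pv_table (l : List (Option String)) :
    (if l.isEmpty then "SKIPPED"
     else if l.any (fun s => s == some "FAIL") then "FAIL"
     else if l.any (fun s => s == some "ERROR") then "ERROR" else "PASS")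
    = (PySem.List.pyGet? ["SKIPPED", "PASS", "ERROR", "FAIL"]
        ((Nat.max 0 (if l.any (fun s => s == some "FAIL") then 3
          else if l.any (fun s => s == some "ERROR") then 2
          else if l.isEmpty then 0 else 1) : Nat) : Int)).getD "" := by
  split_ifs <;> first | rfl | simp_all [List.isEmpty_iff]

-- ===== VERDICT (by name: the statement is the Claim_ definition above) =====
theorem status_rollup_py_spec : Claim_equal_status_rollup_py := by
  intro checks _
  unfold Spec_status_rollup_py status_rollup_py status_rollup_py_alt
  rw [show (fun kv : String × List (String × String) => pvSeverity ((PySem.Dict.mk kv.2).get? "status"))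
        = pvSeverity ∘ (fun kv => (PySem.Dict.mk kv.2).get? "status") from rfl,
     ← List.map_map, pv_fold_max_char]
  exact pv_table _
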